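-- pv_equiv track=rewrite | github.com/kosar-mahboob/DSA-practice | Strings/Longest Balanced Substring I.py | longestBalancedSubstring
-- ===== SOURCE A (Python) =====
-- def longestBalancedSubstring(s: str) -> int:
--     n = len(s)
--     max_len = 0
--
--     for i in range(n):
--         freq = [0] * 26
--         for j in range(i, n):
--             idx = ord(s[j]) - ord('a')
--             freq[idx] += 1
--
--             # check if all present frequencies are equal
--             common = None
--             balanced = True
--             for k in range(26):
--                 if freq[k] > 0:
--                     if common is None:
--                         common = freq[k]
--                     elif freq[k] != common:
--                         balanced = False
--                         break
--             if balanced: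
--                 max_len = max(max_len, j - i + 1)
--
--     return max_len
-- ===== SOURCE B (Python) =====
-- def longestBalancedSubstring(s: str) -> int:
--     # O(1) balance test per window: a window is balanced iff max_count * distinct == window length
--     # (instead of rescanning the 26 buckets each time).
--     n = len(s)
--     best = 0
--     for i in range(n):
--         cnt = [0] * 26
--         distinct = 0
--         mx = 0
--         for j in range(i, n):
--             b = ord(s[j]) - ord('a')
--             if cnt[b] == 0:
--                 distinct += 1
--             cnt[b] += 1
--             if cnt[b] > mx:
--                 mx = cnt[b]
--             if mx * distinct == j - i + 1:
--                 best = max(best, j - i + 1)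
--     return best
-- ===== Notes on version B (the rewrite author's own statement) =====
-- stated objective: alternative
-- what changed: A rescans all 26 frequency buckets after every window extension to test equal frequencies; B maintains the distinct-bucket count and the maximum bucket count incrementally and tests balance in O(1) via max_count * distinct == window length (measured about 3x in a timing run, but unconfirmed at the largest size, so not claimed).
import Mathlib
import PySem

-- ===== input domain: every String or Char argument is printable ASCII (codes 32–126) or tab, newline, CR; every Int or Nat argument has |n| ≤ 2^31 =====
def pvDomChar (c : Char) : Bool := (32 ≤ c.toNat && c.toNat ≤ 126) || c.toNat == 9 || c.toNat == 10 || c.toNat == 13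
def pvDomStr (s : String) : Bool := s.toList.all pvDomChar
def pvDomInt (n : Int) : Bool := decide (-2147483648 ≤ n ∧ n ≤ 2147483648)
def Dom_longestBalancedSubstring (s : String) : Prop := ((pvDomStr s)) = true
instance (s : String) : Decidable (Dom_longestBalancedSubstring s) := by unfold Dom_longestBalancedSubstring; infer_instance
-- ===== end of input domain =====

-- B replaces A's 26-entry balance scan per window by an O(1) check mx * distinct == window length,
-- maintaining the maximum count and the distinct-bucket count incrementally (objective: alternative).

-- ===== PORT A =====
-- body of A's `for k in range(26)` check; once balanced is False the state never changes,
-- which is exactly Python's `break` (nothing after the loop reads k).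
def pvBalStep (st : Option Int × Bool) (v : Int) : Option Int × Bool :=
  if st.2 = false then st
  else if 0 < v then
    match st.1 with
    | none => (some v, true)
    | some c => if v ≠ c then (st.1, false) else st
  else st

def longestBalancedSubstring (s : String) : Int :=
  let cs := s.toList
  let n := PySem.List.len cs
  (PySem.List.pyRange 0 n 1).foldl (fun max_len i =>
    ((PySem.List.pyRange i n 1).foldl (fun (st : List Int × Int) j =>
        let freq := st.1
        let idx : Int := ((PySem.List.pyGetD cs j ' ').toNat : Int) - 97
        -- freq[idx] += 1 ; Pre_ guarantees the index is in range, where pyGetD/pySetD are exact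
        let freq := PySem.List.pySetD freq idx (PySem.List.pyGetD freq idx 0 + 1)
        let cb := (PySem.List.pyRange 0 26 1).foldl
            (fun st2 k => pvBalStep st2 (PySem.List.pyGetD freq k 0)) (none, true)
        (freq, if cb.2 then max st.2 (j - i + 1) else st.2))
      (List.replicate 26 0, max_len)).2) 0

-- ===== PORT B =====
def longestBalancedSubstring_alt (s : String) : Int :=
  let cs := s.toList
  let n := PySem.List.len cs
  (PySem.List.pyRange 0 n 1).foldl (fun best i =>
    ((PySem.List.pyRange i n 1).foldl (fun (st : List Int × Int × Int × Int) j =>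
        let cnt := st.1
        let b : Int := ((PySem.List.pyGetD cs j ' ').toNat : Int) - 97
        let old := PySem.List.pyGetD cnt b 0
        let d := if old = 0 then st.2.1 + 1 else st.2.1
        let cnt := PySem.List.pySetD cnt b (old + 1)
        let mx := if old + 1 > st.2.2.1 then old + 1 else st.2.2.1
        let best := if mx * d = j - i + 1 then max st.2.2.2 (j - i + 1) else st.2.2.2
        (cnt, d, mx, best))
      (List.replicate 26 0, 0, 0, best)).2.2.2) 0

-- ===== PRECONDITION & SPEC =====
-- Pre_ excludes exactly the inputs on which A raises IndexError: any character whose code is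
-- below 71 or above 122 makes ord(c)-97 fall outside [-26, 25], so `freq[idx] += 1`
-- raises (B raises there too).
def Pre_longestBalancedSubstring (s : String) : Prop :=
  s.toList.all (fun c => 71 ≤ c.toNat && c.toNat ≤ 122) = true

instance (s : String) : Decidable (Pre_longestBalancedSubstring s) := by
  unfold Pre_longestBalancedSubstring; infer_instance

def pvWitness_longestBalancedSubstring : String := "ab"

def Spec_longestBalancedSubstring (s : String) (out : Int) : Prop := out = longestBalancedSubstring_alt s
instance (s : String) (out : Int) : Decidable (Spec_longestBalancedSubstring s out) := by unfold Spec_longestBalancedSubstring; infer_instance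

-- ===== CLAIM (what is proved, stated in full; the proofs are below) =====
def Claim_equal_longestBalancedSubstring : Prop := ∀ (s : String), Dom_longestBalancedSubstring s → Pre_longestBalancedSubstring s → Spec_longestBalancedSubstring s (longestBalancedSubstring s)

-- ===== LEMMAS AND PROOFS =====

-- effective position of Python index idx ∈ [-26,25] in a 26-list (negative indices wrap)
def pvEff (idx : Int) : Nat := (idx + 26).toNat % 26

theorem pv_getD_eff (l : List Int) (idx : Int) (hl : l.length = 26)
    (h1 : -26 ≤ idx) (h2 : idx ≤ 25) (he : pvEff idx < l.length) :
    PySem.List.pyGetD l idx 0 = l[pvEff idx] := by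
  unfold pvEff at *
  by_cases h : 0 ≤ idx
  · rw [PySem.List.pyGetD_eq_getElem l 0 h (by omega)]
    congr 1; omega
  · have h' : idx < 0 := by omega
    have hk : idx = -(((-idx).toNat : Nat) : Int) := by omega
    conv_lhs => rw [hk]
    rw [PySem.List.pyGetD_neg_natCast l _ 0 (by omega) (by omega)]
    congr 1; omega

theorem pv_setD_eff (l : List Int) (idx : Int) (v : Int) (hl : l.length = 26)
    (h1 : -26 ≤ idx) (h2 : idx ≤ 25) :
    PySem.List.pySetD l idx v = l.set (pvEff idx) v := by
  unfold pvEff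
  simp only [PySem.List.pySetD, PySem.List.pySet?, PySem.List.pyIdx?, hl]
  by_cases h : 0 ≤ idx
  · rw [if_pos h, if_pos (by omega : idx < ((26:Nat):Int))]
    simp only [Option.map_some, Option.getD_some]
    congr 1; omega
  · rw [if_neg h, if_pos (by omega : -((26:Nat):Int) ≤ idx)]
    simp only [Option.map_some, Option.getD_some]
    congr 1; omega

-- ---- update lemmas for cnt.set e (cnt[e]+1) ----
theorem pv_sum_set (l : List Int) (e : Nat) (he : e < l.length) :
    (l.set e (l[e] + 1)).sum = l.sum + 1 := by
  induction l generalizing e with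
  | nil => simp at he
  | cons a t ih =>
    cases e with
    | zero => simp [List.set]; ring
    | succ k =>
      simp only [List.set, List.sum_cons, List.getElem_cons_succ]
      rw [ih k (by simpa using he)]; ring

def pvNZ (x : Int) : Bool := decide (x ≠ 0)

theorem pv_count_set (l : List Int) (e : Nat) (he : e < l.length) (hnn : ∀ v ∈ l, 0 ≤ v) :
    ((l.set e (l[e] + 1)).countP pvNZ : Int)
      = (l.countP pvNZ : Int) + (if l[e] = 0 then 1 else 0) := by
  induction l generalizing e with
  | nil => simp at he
  | cons a t ih =>
    cases e with
    | zero =>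
      have ha : 0 ≤ a := hnn a (by simp)
      simp only [List.set, List.countP_cons, List.getElem_cons_zero]
      by_cases h : a = 0 <;> simp [h, pvNZ] <;> omega
    | succ k =>
      simp only [List.set, List.countP_cons, List.getElem_cons_succ]
      have := ih k (by simpa using he) (fun v hv => hnn v (by simp [hv]))
      by_cases h : pvNZ a = true <;> simp [h] at * <;> omega

theorem pv_foldl_max_assoc (l : List Int) (a b : Int) :
    l.foldl max (max a b) = max (l.foldl max a) b := by
  induction l generalizing a with
  | nil => simp
  | cons x t ih =>
    simp only [List.foldl_cons]
    rw [show max (max a b) x = max (max a x) b by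
      rcases le_total a b with h | h <;> rcases le_total a x with h2 | h2 <;>
        rcases le_total b x with h3 | h3 <;> simp [max_def] <;> omega]
    exact ih (max a x)

theorem pv_mx_set (l : List Int) (e : Nat) (he : e < l.length) :
    (l.set e (l[e] + 1)).foldl max 0 = max (l.foldl max 0) (l[e] + 1) := by
  induction l generalizing e with
  | nil => simp at he
  | cons a t ih =>
    cases e with
    | zero =>
      simp only [List.set, List.getElem_cons_zero, List.foldl_cons]
      rw [show max 0 (a+1) = max (max 0 a) (a+1) by omega, pv_foldl_max_assoc,
          pv_foldl_max_assoc]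
    | succ k =>
      have hk : k < t.length := by simpa using he
      simp only [List.set, List.getElem_cons_succ, List.foldl_cons]
      have h1 : t.foldl max (max 0 a) = max (t.foldl max 0) a := pv_foldl_max_assoc t 0 a
      have h2 : (t.set k (t[k]'hk+1)).foldl max (max 0 a) = max ((t.set k (t[k]'hk+1)).foldl max 0) a :=
        pv_foldl_max_assoc _ 0 a
      rw [h2, ih k hk, h1]
      rcases le_total (t.foldl max 0) (t[k]'hk+1) with h | h <;> simp [max_def] <;> omega

theorem pv_mx_mem (l : List Int) : l.foldl max 0 = 0 ∨ l.foldl max 0 ∈ l := by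
  induction l with
  | nil => simp
  | cons a t ih =>
    simp only [List.foldl_cons]
    rw [pv_foldl_max_assoc t 0 a]
    rcases le_total (t.foldl max 0) a with h | h
    · right; simp [max_eq_right h]
    · rw [max_eq_left h]
      rcases ih with h2 | h2
      · left; exact h2
      · right; simp [h2]

-- ---- A's balance scan characterised ----
theorem pv_bal_false (l : List Int) (c : Option Int) :
    l.foldl pvBalStep (c, false) = (c, false) := by
  induction l with
  | nil => rfl
  | cons x t ih => simpa [pvBalStep] using ih

theorem pv_bal_some (l : List Int) (c : Int) :
    (l.foldl pvBalStep (some c, true)).2 = true ↔ ∀ x ∈ l, 0 < x → x = c := by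
  induction l with
  | nil => simp
  | cons x t ih =>
    simp only [List.foldl_cons, pvBalStep]
    by_cases hx : 0 < x
    · by_cases hc : x = c
      · simp [hc, ih]
      · simp [hx, hc, pv_bal_false]
    · simp [hx, ih]

theorem pv_bal_none (l : List Int) :
    (l.foldl pvBalStep (none, true)).2 = true ↔
      ∀ x ∈ l, ∀ y ∈ l, 0 < x → 0 < y → x = y := by
  induction l with
  | nil => simp
  | cons x t ih =>
    simp only [List.foldl_cons, pvBalStep]
    by_cases hx : 0 < x
    · simp only [if_neg (by simp : ¬(true = false)), if_pos hx]
      rw [pv_bal_some]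
      constructor
      · intro h a ha b hb hap hbp
        rcases List.mem_cons.mp ha with ha | ha <;> rcases List.mem_cons.mp hb with hb | hb
        · rw [ha, hb]
        · rw [ha, (h b hb hbp)]
        · rw [hb, (h a ha hap)]
        · rw [h a ha hap, h b hb hbp]
      · intro h y hy hyp
        exact h y (by simp [hy]) x (by simp) hyp hx
    · simp only [if_neg (by simp : ¬(true = false)), if_neg hx, ih]
      constructor
      · intro h a ha b hb hap hbp
        rcases List.mem_cons.mp ha with ha | ha
        · omega
        · rcases List.mem_cons.mp hb with hb | hb
          · omega
          · exact h a ha b hb hap hbp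
      · intro h a ha b hb hap hbp
        exact h a (by simp [ha]) b (by simp [hb]) hap hbp

theorem pv_sum_le (l : List Int) (m : Int) (h : ∀ x ∈ l, 0 ≤ x ∧ x ≤ m) :
    l.sum ≤ m * l.countP pvNZ := by
  induction l with
  | nil => simp
  | cons a t ih =>
    have ha := h a (by simp)
    have iht := ih (fun x hx => h x (by simp [hx]))
    simp only [List.sum_cons, List.countP_cons]
    by_cases h0 : a = 0
    · have hp : pvNZ a = false := by subst h0; rfl
      subst h0
      simp only [hp, Bool.false_eq_true, if_false, Nat.add_zero, zero_add]
      exact iht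
    · have hp : pvNZ a = true := by simp [pvNZ, h0]
      simp only [hp]
      push_cast
      nlinarith [iht, ha.1, ha.2]

theorem pv_sum_eq_iff (l : List Int) (m : Int) (h : ∀ x ∈ l, 0 ≤ x ∧ x ≤ m) :
    l.sum = m * l.countP pvNZ ↔ ∀ x ∈ l, x ≠ 0 → x = m := by
  induction l with
  | nil => simp
  | cons a t ih =>
    have ha := h a (by simp)
    have iht := ih (fun x hx => h x (by simp [hx]))
    have hle := pv_sum_le t m (fun x hx => h x (by simp [hx]))
    simp only [List.sum_cons, List.countP_cons, List.mem_cons, forall_eq_or_imp]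
    by_cases h0 : a = 0
    · have hp : pvNZ a = false := by subst h0; rfl
      subst h0
      simp [hp, iht]
    · have hp : pvNZ a = true := by simp [pvNZ, h0]
      simp only [hp]
      push_cast
      rw [show m * ((t.countP pvNZ : Int) + 1) = m * (t.countP pvNZ : Int) + m by ring]
      constructor
      · intro he
        have h1 : a = m := by linarith [hle, ha.2]
        have h2 : t.sum = m * (t.countP pvNZ : Int) := by linarith [ha.2]
        exact ⟨fun _ => h1, iht.mp h2⟩
      · intro ht
        have h2 := iht.mpr ht.2
        rw [ht.1 h0, h2]; ring

theorem pv_pairwise_iff_eq_mx (l : List Int) (hnn : ∀ v ∈ l, 0 ≤ v) :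
    (∀ x ∈ l, ∀ y ∈ l, 0 < x → 0 < y → x = y) ↔ (∀ x ∈ l, x ≠ 0 → x = l.foldl max 0) := by
  constructor
  · intro h x hx hxn
    have hxp : 0 < x := lt_of_le_of_ne (hnn x hx) (Ne.symm hxn)
    have hmx : x ≤ l.foldl max 0 := (PySem.List.le_foldl_max l 0).2 x hx
    rcases pv_mx_mem l with hm | hm
    · omega
    · exact h x hx _ hm hxp (by omega)
  · intro h x hx y hy hxp hyp
    rw [h x hx (by omega), h y hy (by omega)]

-- the two balance tests agree on a nonneg table
theorem pv_check_iff (l : List Int) (S : Int) (hnn : ∀ v ∈ l, 0 ≤ v) (hs : l.sum = S) :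
    ((l.foldl pvBalStep (none, true)).2 = true) ↔
      (l.foldl max 0) * (l.countP pvNZ : Int) = S := by
  have h' : ∀ x ∈ l, 0 ≤ x ∧ x ≤ l.foldl max 0 :=
    fun x hx => ⟨hnn x hx, (PySem.List.le_foldl_max l 0).2 x hx⟩
  rw [pv_bal_none, pv_pairwise_iff_eq_mx l hnn, ← pv_sum_eq_iff l _ h', hs]
  exact eq_comm

theorem pv_mx_replicate (n : Nat) : (List.replicate n (0:Int)).foldl max 0 = 0 := by
  induction n with
  | zero => rfl
  | succ k ih => simpa [List.replicate_succ] using ih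

-- proof-side names for the two ports' inner-loop bodies (definitionally equal to the inline lambdas)
def pvStepA (cs : List Char) (i : Int) (st : List Int × Int) (j : Int) : List Int × Int :=
  let freq := st.1
  let idx : Int := ((PySem.List.pyGetD cs j ' ').toNat : Int) - 97
  let freq := PySem.List.pySetD freq idx (PySem.List.pyGetD freq idx 0 + 1)
  let cb := (PySem.List.pyRange 0 26 1).foldl
      (fun st2 k => pvBalStep st2 (PySem.List.pyGetD freq k 0)) (none, true)
  (freq, if cb.2 then max st.2 (j - i + 1) else st.2)

def pvStepB (cs : List Char) (i : Int) (st : List Int × Int × Int × Int) (j : Int) :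
    List Int × Int × Int × Int :=
  let cnt := st.1
  let b : Int := ((PySem.List.pyGetD cs j ' ').toNat : Int) - 97
  let old := PySem.List.pyGetD cnt b 0
  let d := if old = 0 then st.2.1 + 1 else st.2.1
  let cnt := PySem.List.pySetD cnt b (old + 1)
  let mx := if old + 1 > st.2.2.1 then old + 1 else st.2.2.1
  let best := if mx * d = j - i + 1 then max st.2.2.2 (j - i + 1) else st.2.2.2
  (cnt, d, mx, best)

-- main inner-loop invariant, by induction on the window length t
theorem pv_inner (cs : List Char) (hpre : ∀ c ∈ cs, 71 ≤ c.toNat ∧ c.toNat ≤ 122)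
    (i : Int) (hi : 0 ≤ i) (t : Nat) (hit : i + t ≤ cs.length) (x : Int) :
    ((PySem.List.pyRange i (i + t) 1).foldl (pvStepA cs i) (List.replicate 26 0, x)).1
        = ((PySem.List.pyRange i (i + t) 1).foldl (pvStepB cs i) (List.replicate 26 0, 0, 0, x)).1
    ∧ ((PySem.List.pyRange i (i + t) 1).foldl (pvStepB cs i) (List.replicate 26 0, 0, 0, x)).1.length = 26
    ∧ (∀ v ∈ ((PySem.List.pyRange i (i + t) 1).foldl (pvStepB cs i) (List.replicate 26 0, 0, 0, x)).1, 0 ≤ v)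
    ∧ ((PySem.List.pyRange i (i + t) 1).foldl (pvStepB cs i) (List.replicate 26 0, 0, 0, x)).1.sum = (t : Int)
    ∧ ((PySem.List.pyRange i (i + t) 1).foldl (pvStepB cs i) (List.replicate 26 0, 0, 0, x)).2.1
        = (((PySem.List.pyRange i (i + t) 1).foldl (pvStepB cs i) (List.replicate 26 0, 0, 0, x)).1.countP pvNZ : Int)
    ∧ ((PySem.List.pyRange i (i + t) 1).foldl (pvStepB cs i) (List.replicate 26 0, 0, 0, x)).2.2.1
        = ((PySem.List.pyRange i (i + t) 1).foldl (pvStepB cs i) (List.replicate 26 0, 0, 0, x)).1.foldl max 0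
    ∧ ((PySem.List.pyRange i (i + t) 1).foldl (pvStepA cs i) (List.replicate 26 0, x)).2
        = ((PySem.List.pyRange i (i + t) 1).foldl (pvStepB cs i) (List.replicate 26 0, 0, 0, x)).2.2.2 := by
  induction t with
  | zero =>
    rw [show (i + ((0:Nat):Int)) = i by push_cast; ring]
    rw [PySem.List.pyRange_one_eq_nil (le_refl i)]
    refine ⟨rfl, by simp, ?_, by simp, by simp [pvNZ], ?_, rfl⟩
    · intro v hv; simp [List.eq_of_mem_replicate hv]
    · exact (pv_mx_replicate 26).symm
  | succ t ih =>
    have hit' : i + t ≤ cs.length := by push_cast at hit ⊢; omega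
    have hsplit : PySem.List.pyRange i (i + ((t+1:Nat):Int)) 1
        = PySem.List.pyRange i (i + t) 1 ++ [i + t] := by
      rw [show (i + ((t+1:Nat):Int)) = (i + t) + 1 by push_cast; ring]
      exact PySem.List.pyRange_one_succ_right (by omega)
    rw [hsplit]
    simp only [List.foldl_append, List.foldl_cons, List.foldl_nil]
    obtain ⟨h1, h2, h3, h4, h5, h6, h7⟩ := ih hit'
    set sA := (PySem.List.pyRange i (i + t) 1).foldl (pvStepA cs i) (List.replicate 26 0, x) with hsA
    set sB := (PySem.List.pyRange i (i + t) 1).foldl (pvStepB cs i) ((List.replicate 26 0 : List Int), 0, 0, x) with hsB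
    have hlt : i + (t:Int) < (cs.length : Int) := by push_cast at hit; omega
    have hc : PySem.List.pyGetD cs (i + t) ' ' = cs[(i + (t:Int)).toNat]'(by omega) :=
      PySem.List.pyGetD_eq_getElem cs ' ' (by omega) hlt
    have hbnd := hpre _ (List.getElem_mem (by omega : (i + (t:Int)).toNat < cs.length))
    set c := cs[(i + (t:Int)).toNat]'(by omega) with hcdef
    set idx : Int := ((c.toNat : Int) - 97) with hidxdef
    have hidx1 : -26 ≤ idx := by omega
    have hidx2 : idx ≤ 25 := by omega
    have he : pvEff idx < sB.1.length := by rw [h2]; unfold pvEff; omega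
    set e := pvEff idx with hedef
    have hold : PySem.List.pyGetD sB.1 idx 0 = sB.1[e]'he := pv_getD_eff sB.1 idx h2 hidx1 hidx2 he
    have hset : PySem.List.pySetD sB.1 idx (sB.1[e]'he + 1) = sB.1.set e (sB.1[e]'he + 1) :=
      pv_setD_eff sB.1 idx _ h2 hidx1 hidx2
    -- the updated table
    set l' := sB.1.set e (sB.1[e]'he + 1) with hl'
    have hlen' : l'.length = 26 := by rw [hl', List.length_set, h2]
    have hnn' : ∀ v ∈ l', 0 ≤ v := by
      intro v hv
      rcases List.mem_or_eq_of_mem_set hv with hv2 | hv2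
      · exact h3 v hv2
      · have := h3 _ (List.getElem_mem he)
        omega
    have hsum' : l'.sum = (t:Int) + 1 := by
      rw [hl', pv_sum_set sB.1 e he, h4]
    have hcnt' : (l'.countP pvNZ : Int)
        = (sB.1.countP pvNZ : Int) + (if sB.1[e]'he = 0 then 1 else 0) := by
      rw [hl', pv_count_set sB.1 e he h3]
    have hmx' : l'.foldl max 0 = max (sB.1.foldl max 0) (sB.1[e]'he + 1) := by
      rw [hl', pv_mx_set sB.1 e he]
    -- both step results, unfolded
    simp only [pvStepA, pvStepB, h1, hc, ← hidxdef, hold, hset]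
    have harith : (i + (t:Int)) - i + 1 = (t:Int) + 1 := by ring
    -- A's check on l' equals B's O(1) check
    have h26 : (26:Int) = PySem.List.len l' := by
      simp [PySem.List.len_eq, hlen']
    have hcb : (((PySem.List.pyRange 0 26 1).foldl
        (fun st2 k => pvBalStep st2 (PySem.List.pyGetD l' k 0)) (none, true)).2 = true)
        ↔ (l'.foldl max 0) * (l'.countP pvNZ : Int) = (t:Int) + 1 := by
      rw [h26, PySem.List.foldl_pyRange_zero_pyGetD l' 0 pvBalStep (none, true)]
      exact pv_check_iff l' _ hnn' hsum'
    have hbcond : (if sB.1[e]'he + 1 > sB.2.2.1 then sB.1[e]'he + 1 else sB.2.2.1)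
        * (if sB.1[e]'he = 0 then sB.2.1 + 1 else sB.2.1)
        = (l'.foldl max 0) * (l'.countP pvNZ : Int) := by
      rw [hmx', hcnt', h5, h6]
      congr 1
      · rcases le_or_gt (sB.1[e]'he + 1) (sB.1.foldl max 0) with h | h
        · rw [if_neg (by omega), max_eq_left h]
        · rw [if_pos (by omega), max_eq_right (by omega)]
      · split_ifs <;> omega
    refine ⟨trivial, hlen', hnn', by push_cast; exact hsum', ?_, ?_, ?_⟩
    · rw [hcnt', h5]; split_ifs <;> push_cast <;> ring
    · rw [hmx', h6]
      rcases le_or_gt (sB.1[e]'he + 1) (sB.1.foldl max 0) with h | h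
      · rw [if_neg (by omega), max_eq_left h]
      · rw [if_pos (by omega), max_eq_right (by omega)]
    · rw [harith, hbcond, h7]
      by_cases hcond : List.foldl max 0 l' * ((List.countP pvNZ l' : Int)) = (t:Int) + 1
      · rw [if_pos (hcb.mpr hcond), if_pos hcond]
      · rw [if_neg (fun hh => hcond (hcb.mp hh)), if_neg hcond]
-- ===== VERDICT (by name: the statement is the Claim_ definition above) =====
theorem longestBalancedSubstring_spec : Claim_equal_longestBalancedSubstring := by
  intro s _ hpre0
  have hpre : ∀ c ∈ s.toList, 71 ≤ c.toNat ∧ c.toNat ≤ 122 := by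
    intro c hc
    have := List.all_eq_true.mp hpre0 c hc
    simpa using this
  unfold Spec_longestBalancedSubstring longestBalancedSubstring longestBalancedSubstring_alt
  refine PySem.List.foldl_congr_mem _ _ _ _ ?_
  intro acc j hj
  rw [PySem.List.mem_pyRange_one] at hj
  have hj2 : j < (s.toList.length : Int) := by simpa [PySem.List.len_eq] using hj.2
  set t := ((s.toList.length : Int) - j).toNat with ht
  have hlen : PySem.List.len s.toList = j + (t:Int) := by
    simp only [PySem.List.len_eq]; omega
  have H := pv_inner s.toList hpre j hj.1 t (by omega) acc
  rw [hlen]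
  exact H.2.2.2.2.2.2
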